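-- pv_equiv track=rewrite | github.com/svagier/apriori_s | apriori_s.py | get_candidate_sequences_with_support
-- ===== SOURCE A (Python) =====
-- def get_candidate_sequences_with_support(dataset: [], candidate_sequences_without_sup: []) -> []:
--     candidate_sequences_with_support = []
--     for candidate_seq in candidate_sequences_without_sup:
--         occurrences = 0
--         for seq_tuple in dataset:
--             iter = 0
--             for element in candidate_seq:
--                 if element == seq_tuple[1][iter]:
--                     iter += 1
--                 else:
--                     break
--             if iter == len(candidate_seq):
--                 occurrences += 1
--         candidate_sequences_with_support.append((candidate_seq, occurrences))
--     return candidate_sequences_with_support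
-- ===== SOURCE B (Python) =====
-- def get_candidate_sequences_with_support(dataset: [], candidate_sequences_without_sup: []) -> []:
--     # Alternative strategy: count every prefix of every dataset sequence once, then answer each
--     # candidate with a single dictionary lookup.
--     counts = {}
--     for seq_tuple in dataset:
--         pref = ()
--         counts[pref] = counts.get(pref, 0) + 1
--         for x in seq_tuple[1]:
--             pref = pref + (x,)
--             counts[pref] = counts.get(pref, 0) + 1
--     return [(c, counts.get(tuple(c), 0)) for c in candidate_sequences_without_sup]
-- ===== Notes on version B (the rewrite author's own statement) =====
-- stated objective: alternative
-- what changed: Instead of scanning the whole dataset per candidate, B counts every prefix of every dataset sequence once into a dictionary and answers each candidate with a single lookup; it trades the per-candidate dataset scans for prefix-table construction.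
-- crash fix: On inputs where some dataset sequence is a strict prefix of some candidate, A raises IndexError (it indexes past the end of the sequence); B returns the prefix-count (such a sequence simply does not have the candidate as a prefix). — e.g. on get_candidate_sequences_with_support([(0, [1])], [[1, 2]]): A raises IndexError, B returns [([1, 2], 0)]
import Mathlib
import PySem

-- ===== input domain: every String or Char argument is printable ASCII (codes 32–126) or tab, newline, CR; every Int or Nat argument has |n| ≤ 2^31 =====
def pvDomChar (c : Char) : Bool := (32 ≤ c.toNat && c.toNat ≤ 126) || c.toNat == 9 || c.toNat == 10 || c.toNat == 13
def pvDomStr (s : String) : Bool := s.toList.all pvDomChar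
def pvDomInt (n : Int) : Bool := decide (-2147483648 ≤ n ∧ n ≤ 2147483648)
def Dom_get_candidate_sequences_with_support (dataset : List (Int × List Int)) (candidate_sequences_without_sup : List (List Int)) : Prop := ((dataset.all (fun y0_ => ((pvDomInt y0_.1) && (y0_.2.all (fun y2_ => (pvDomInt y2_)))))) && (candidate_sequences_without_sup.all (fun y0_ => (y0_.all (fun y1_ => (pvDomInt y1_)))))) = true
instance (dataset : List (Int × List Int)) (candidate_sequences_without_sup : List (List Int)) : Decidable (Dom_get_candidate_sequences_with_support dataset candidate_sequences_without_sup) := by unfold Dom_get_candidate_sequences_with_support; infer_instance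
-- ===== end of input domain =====

-- B replaces A's per-candidate dataset scan by one prefix-counting dictionary built once
-- over the dataset, answering each candidate by a single lookup (objective: alternative).


-- ===== PORT A =====
-- the inner 'for element in candidate_seq' loop: walks candidate_seq, indexing seq by iter.
-- On the index out of range Python raises IndexError (pyGet? = none); those inputs are
-- excluded by Pre_ below, and the port returns the current iter there as a stand-in.
def aIter (s : List Int) : List Int → Int → Int
  | [], iter => iter
  | element :: rest, iter =>
    match PySem.List.pyGet? s iter with
    | none => iter  -- IndexError in Python; outside Pre_
    | some v => if element = v then aIter s rest (iter + 1) else iter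

def get_candidate_sequences_with_support (dataset : List (Int × List Int)) (candidate_sequences_without_sup : List (List Int)) : List (List Int × Int) :=
  candidate_sequences_without_sup.foldl (fun acc candidate_seq =>
    let occurrences : Int := dataset.foldl (fun occurrences seq_tuple =>
      if aIter seq_tuple.2 candidate_seq 0 = (candidate_seq.length : Int)
      then occurrences + 1 else occurrences) 0
    acc ++ [(candidate_seq, occurrences)]) []

-- ===== PORT B =====
-- counts[pref] = counts.get(pref, 0) + 1
def bAdd (counts : PySem.Dict (List Int) Int) (pref : List Int) : PySem.Dict (List Int) Int :=
  counts.insert pref (counts.getD pref 0 + 1)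

def get_candidate_sequences_with_support_alt (dataset : List (Int × List Int)) (candidate_sequences_without_sup : List (List Int)) : List (List Int × Int) :=
  let counts : PySem.Dict (List Int) Int :=
    dataset.foldl (fun counts seq_tuple =>
      (seq_tuple.2.foldl (fun (pc : List Int × PySem.Dict (List Int) Int) x =>
          let pref := pc.1 ++ [x]
          (pref, bAdd pc.2 pref))
        (([] : List Int), bAdd counts [])).2)
      PySem.Dict.empty
  candidate_sequences_without_sup.map (fun c => (c, counts.getD c 0))

-- ===== PRECONDITION & SPEC =====
-- Pre_ excludes exactly the inputs on which A raises IndexError: those where some dataset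
-- sequence is a strict prefix of some candidate sequence.
def Pre_get_candidate_sequences_with_support (dataset : List (Int × List Int)) (candidate_sequences_without_sup : List (List Int)) : Prop :=
  ∀ c ∈ candidate_sequences_without_sup, ∀ st ∈ dataset, ¬ (st.2.length < c.length ∧ st.2 <+: c)
instance (dataset : List (Int × List Int)) (candidate_sequences_without_sup : List (List Int)) : Decidable (Pre_get_candidate_sequences_with_support dataset candidate_sequences_without_sup) := by unfold Pre_get_candidate_sequences_with_support; infer_instance

def pvWitness_get_candidate_sequences_with_support : (List (Int × List Int)) × List (List Int) :=
  ([(1, [1, 2, 3]), (2, [1, 2])], [[1], [1, 2], [2]])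

-- On inputs where some dataset sequence is a strict prefix of some candidate, A raises
-- IndexError; B returns the prefix-count (such a sequence does not have the candidate as a prefix).
def Raises_get_candidate_sequences_with_support (dataset : List (Int × List Int)) (candidate_sequences_without_sup : List (List Int)) : Prop :=
  ∃ c ∈ candidate_sequences_without_sup, ∃ st ∈ dataset, st.2.length < c.length ∧ st.2 <+: c
instance (dataset : List (Int × List Int)) (candidate_sequences_without_sup : List (List Int)) : Decidable (Raises_get_candidate_sequences_with_support dataset candidate_sequences_without_sup) := by unfold Raises_get_candidate_sequences_with_support; infer_instance
def pvRaiseWitness_get_candidate_sequences_with_support : (List (Int × List Int)) × List (List Int) :=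
  ([(0, [1])], [[1, 2]])
def pvRaiseWitnessOut_get_candidate_sequences_with_support : List (List Int × Int) := [([1, 2], 0)]

def Spec_get_candidate_sequences_with_support (dataset : List (Int × List Int)) (candidate_sequences_without_sup : List (List Int)) (out : List (List Int × Int)) : Prop := out = get_candidate_sequences_with_support_alt dataset candidate_sequences_without_sup
instance (dataset : List (Int × List Int)) (candidate_sequences_without_sup : List (List Int)) (out : List (List Int × Int)) : Decidable (Spec_get_candidate_sequences_with_support dataset candidate_sequences_without_sup out) := by unfold Spec_get_candidate_sequences_with_support; infer_instance

-- ===== CLAIM (what is proved, stated in full; the proofs are below) =====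
def Claim_equal_get_candidate_sequences_with_support : Prop := ∀ (dataset : List (Int × List Int)) (candidate_sequences_without_sup : List (List Int)), Dom_get_candidate_sequences_with_support dataset candidate_sequences_without_sup → Pre_get_candidate_sequences_with_support dataset candidate_sequences_without_sup → Spec_get_candidate_sequences_with_support dataset candidate_sequences_without_sup (get_candidate_sequences_with_support dataset candidate_sequences_without_sup)
def Claim_raises_get_candidate_sequences_with_support : Prop := (∀ (dataset : List (Int × List Int)) (candidate_sequences_without_sup : List (List Int)), Dom_get_candidate_sequences_with_support dataset candidate_sequences_without_sup → Raises_get_candidate_sequences_with_support dataset candidate_sequences_without_sup → ¬ Pre_get_candidate_sequences_with_support dataset candidate_sequences_without_sup) ∧ (Dom_get_candidate_sequences_with_support (pvRaiseWitness_get_candidate_sequences_with_support.1) (pvRaiseWitness_get_candidate_sequences_with_support.2) ∧ Raises_get_candidate_sequences_with_support (pvRaiseWitness_get_candidate_sequences_with_support.1) (pvRaiseWitness_get_candidate_sequences_with_support.2) ∧ get_candidate_sequences_with_support_alt (pvRaiseWitness_get_candidate_sequences_with_support.1) (pvRaiseWitness_get_candidate_sequences_with_support.2) = pvRaiseWitn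essOut_get_candidate_sequences_with_support)

-- ===== LEMMAS AND PROOFS =====

-- length of the common prefix of c and s, read off structurally (characterises A's inner loop)
def matchLen : List Int → List Int → Nat
  | [], _ => 0
  | _ :: _, [] => 0
  | e :: r, x :: t => if e = x then matchLen r t + 1 else 0

lemma aIter_eq (c : List Int) : ∀ (s : List Int) (k : Nat),
    aIter s c (k : Int) = (k : Int) + (matchLen c (s.drop k) : Int) := by
  induction c with
  | nil => intro s k; simp [aIter, matchLen]
  | cons e r ih =>
    intro s k
    have hget : PySem.List.pyGet? s (k : Int) = s[k]? := by
      simp [pysem]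
    have hdrop : s[k]? = (s.drop k).head? := List.head?_drop.symm
    cases hs : s.drop k with
    | nil =>
      simp [aIter, hget, hdrop, hs, matchLen]
    | cons x t =>
      rw [show aIter s (e :: r) (k : Int) = (match PySem.List.pyGet? s (k : Int) with
        | none => (k : Int)
        | some v => if e = v then aIter s r ((k : Int) + 1) else (k : Int)) from rfl]
      rw [hget, hdrop, hs]
      simp only [List.head?]
      by_cases he : e = x
      · have : ((k : Int) + 1) = ((k + 1 : Nat) : Int) := by push_cast; ring
        rw [if_pos he, this, ih s (k + 1)]
        have ht : s.drop (k + 1) = t := by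
          rw [← List.tail_drop, hs]; rfl
        rw [ht]; simp only [matchLen, if_pos he]; push_cast; ring
      · rw [if_neg he]; simp [matchLen, he]

lemma matchLen_eq_length_iff (c s : List Int) : matchLen c s = c.length ↔ c <+: s := by
  induction c generalizing s with
  | nil => simp [matchLen]
  | cons e r ih =>
    cases s with
    | nil => simp [matchLen]
    | cons x t =>
      by_cases he : e = x
      · subst he
        simp [matchLen, ih]
      · simp [matchLen, he]

lemma aIter_zero_iff (c s : List Int) :
    (aIter s c 0 = (c.length : Int)) ↔ c <+: s := by
  have := aIter_eq c s 0
  simp only [Nat.cast_zero, zero_add, List.drop_zero] at this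
  rw [this]
  constructor
  · intro h
    have : matchLen c s = c.length := by exact_mod_cast h
    exact (matchLen_eq_length_iff c s).mp this
  · intro h
    have : matchLen c s = c.length := (matchLen_eq_length_iff c s).mpr h
    exact_mod_cast congrArg (fun n : Nat => (n : Int)) this

-- the list of nonempty prefixes of s, each extended from p (tracks B's inner loop)
def prefsFrom (p : List Int) : List Int → List (List Int)
  | [] => []
  | x :: t => (p ++ [x]) :: prefsFrom (p ++ [x]) t

lemma bInner_eq (s : List Int) : ∀ (p : List Int) (d : PySem.Dict (List Int) Int),
    (s.foldl (fun (pc : List Int × PySem.Dict (List Int) Int) x =>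
        let pref := pc.1 ++ [x]
        (pref, bAdd pc.2 pref)) (p, d)).2
      = (prefsFrom p s).foldl bAdd d := by
  induction s with
  | nil => intro p d; simp [prefsFrom]
  | cons x t ih => intro p d; simp only [List.foldl_cons, prefsFrom]; exact ih (p ++ [x]) (bAdd d (p ++ [x]))

lemma getD_foldl_bAdd (l : List (List Int)) (d : PySem.Dict (List Int) Int) (c : List Int) :
    (l.foldl bAdd d).getD c 0 = d.getD c 0 + l.count c := by
  have := PySem.Dict.getD_foldl_insert_add_one (l := l) (d := d) (v := c)
  simpa [bAdd] using this

lemma count_prefsFrom (c : List Int) : ∀ (s p : List Int),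
    (p :: prefsFrom p s).count c = if (∃ n ≤ s.length, c = p ++ s.take n) then 1 else 0 := by
  intro s
  induction s with
  | nil =>
    intro p
    simp [prefsFrom, List.count_cons, List.count_nil]
    by_cases h : c = p <;> simp [h, eq_comm]
  | cons x t ih =>
    intro p
    have hsplit : (p :: prefsFrom p (x :: t)).count c
        = (if c = p then 1 else 0) + ((p ++ [x]) :: prefsFrom (p ++ [x]) t).count c := by
      simp [prefsFrom, List.count_cons]
      by_cases h : c = p <;> simp [h, eq_comm] <;> ring
    rw [hsplit, ih (p ++ [x])]
    by_cases hp : c = p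
    · have hne : ¬ (∃ n ≤ t.length, c = p ++ [x] ++ t.take n) := by
        rintro ⟨n, _, hn⟩
        have := congrArg List.length hn
        simp [hp] at this
      have hyes : ∃ n ≤ (x :: t).length, c = p ++ (x :: t).take n :=
        ⟨0, by omega, by simp [hp]⟩
      rw [if_pos hp, if_neg hne, if_pos hyes]
    · have hiff : (∃ n ≤ t.length, c = p ++ [x] ++ t.take n) ↔ (∃ n ≤ (x :: t).length, c = p ++ (x :: t).take n) := by
        constructor
        · rintro ⟨n, hn, rfl⟩
          exact ⟨n + 1, by simp; omega, by simp⟩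
        · rintro ⟨n, hn, rfl⟩
          cases n with
          | zero => simp at hp
          | succ m => exact ⟨m, by simp at hn; omega, by simp⟩
      rw [if_neg hp, Nat.zero_add]
      exact if_congr hiff rfl rfl

lemma exists_take_iff_prefix (c s : List Int) :
    (∃ n ≤ s.length, c = s.take n) ↔ c <+: s := by
  constructor
  · rintro ⟨n, _, rfl⟩; exact List.take_prefix n s
  · intro h
    exact ⟨c.length, h.length_le, (List.prefix_iff_eq_take.mp h)⟩

-- B's dictionary counts, per key c, the dataset sequences having c as a prefix
lemma counts_spec (dataset : List (Int × List Int)) (c : List Int) :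
    ∀ d : PySem.Dict (List Int) Int,
    (dataset.foldl (fun counts seq_tuple =>
      (seq_tuple.2.foldl (fun (pc : List Int × PySem.Dict (List Int) Int) x =>
          let pref := pc.1 ++ [x]
          (pref, bAdd pc.2 pref))
        (([] : List Int), bAdd counts [])).2) d).getD c 0
      = d.getD c 0 + ((dataset.countP (fun st => decide (c <+: st.2)) : Nat) : Int) := by
  induction dataset with
  | nil => intro d; simp
  | cons st rest ih =>
    intro d
    simp only [List.foldl_cons]
    rw [ih]
    rw [bInner_eq st.2 [] (bAdd d [])]
    rw [getD_foldl_bAdd]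
    have hb : (bAdd d []).getD c 0 = d.getD c 0 + (if c = [] then 1 else 0) := by
      by_cases h : c = [] <;> simp [bAdd, PySem.Dict.getD_insert, h]
    have hcount : (if c = [] then (1:Int) else 0) + ((prefsFrom [] st.2).count c : Int)
        = if c <+: st.2 then 1 else 0 := by
      have := count_prefsFrom c st.2 []
      simp only [List.nil_append] at this
      simp only [exists_take_iff_prefix] at this
      have h2 : (([] : List Int) :: prefsFrom [] st.2).count c
          = (if c = [] then 1 else 0) + (prefsFrom [] st.2).count c := by
        rw [List.count_cons]
        by_cases h : c = [] <;> simp [h] <;> ring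
      rw [h2] at this
      by_cases h : c <+: st.2 <;> by_cases h0 : c = [] <;>
        simp [h, h0] at this ⊢ <;> omega
    rw [List.countP_cons]
    by_cases h : c <+: st.2
    · simp [h] at hcount ⊢
      rw [hb]
      omega
    · simp [h] at hcount ⊢
      rw [hb]
      omega

-- A's per-candidate inner fold counts the same thing
lemma occ_spec (dataset : List (Int × List Int)) (c : List Int) :
    dataset.foldl (fun occurrences seq_tuple =>
      if aIter seq_tuple.2 c 0 = (c.length : Int)
      then occurrences + 1 else occurrences) 0
    = ((dataset.countP (fun st => decide (c <+: st.2)) : Nat) : Int) := by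
  have : ∀ (l : List (Int × List Int)) (acc : Int),
      l.foldl (fun occurrences seq_tuple =>
        if aIter seq_tuple.2 c 0 = (c.length : Int)
        then occurrences + 1 else occurrences) acc
      = acc + ((l.countP (fun st => decide (c <+: st.2)) : Nat) : Int) := by
    intro l
    induction l with
    | nil => intro acc; simp
    | cons st rest ih =>
      intro acc
      simp only [List.foldl_cons, List.countP_cons]
      rw [ih]
      by_cases h : c <+: st.2
      · rw [if_pos ((aIter_zero_iff c st.2).mpr h)]
        simp [h]; omega
      · rw [if_neg (fun hh => h ((aIter_zero_iff c st.2).mp hh))]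
        simp [h]
  simpa using this dataset 0

-- ===== VERDICT (by name: the statement is the Claim_ definition above) =====
theorem get_candidate_sequences_with_support_spec : Claim_equal_get_candidate_sequences_with_support := by
  intro dataset cands _ _
  unfold Spec_get_candidate_sequences_with_support
  unfold get_candidate_sequences_with_support get_candidate_sequences_with_support_alt
  rw [PySem.List.foldl_append_singleton_eq_map]
  apply List.map_congr_left
  intro c _
  simp only
  rw [occ_spec, counts_spec dataset c PySem.Dict.empty]
  simp

theorem get_candidate_sequences_with_support_raises : Claim_raises_get_candidate_sequences_with_support := by
  unfold Claim_raises_get_candidate_sequences_with_support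
  constructor
  · rintro dataset cands _ ⟨c, hc, st, hst, hlt, hpre⟩ hP
    exact hP c hc st hst ⟨hlt, hpre⟩
  · refine ⟨by decide, ⟨[1, 2], by decide, (0, [1]), by decide, by decide, by decide⟩, by decide⟩

-- self-check: the raise witness indeed lies outside Pre_ (via the theorem above)
theorem pvRaiseWitness_outside_Pre_ok :
    ¬ Pre_get_candidate_sequences_with_support
        pvRaiseWitness_get_candidate_sequences_with_support.1
        pvRaiseWitness_get_candidate_sequences_with_support.2 :=
  get_candidate_sequences_with_support_raises.1 _ _
    get_candidate_sequences_with_support_raises.2.1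
    get_candidate_sequences_with_support_raises.2.2.1
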